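-- pv_equiv track=rewrite | github.com/Michaelrobins938/first-principles-attribution | src/adapters/channel_taxonomy.py | get_hierarchy
-- ===== SOURCE A (Python) =====
-- from typing import Dict, List, Optional, Tuple
--
-- CHANNEL_TAXONOMY = {
--     # Level 1 -> Level 2 -> Level 3
--     'Paid': {
--         'Paid Search': ['Brand Search', 'Non-Brand Search', 'Shopping'],
--         'Paid Social': ['Facebook Ads', 'Instagram Ads', 'LinkedIn Ads', 'Twitter Ads', 'TikTok Ads'],
--         'Display': ['Programmatic', 'Direct Buy', 'Retargeting'],
--         'Video': ['YouTube Ads', 'OTT/CTV', 'Pre-roll'],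
--         'Affiliate': ['Partner', 'Influencer', 'Cashback'],
--     },
--     'Organic': {
--         'Organic Search': ['Google', 'Bing', 'DuckDuckGo', 'Other Search'],
--         'Organic Social': ['Facebook', 'Instagram', 'LinkedIn', 'Twitter', 'TikTok', 'Reddit'],
--         'Content': ['Blog', 'News', 'Press'],
--         'Referral': ['Partner Sites', 'Review Sites', 'Forums'],
--     },
--     'Direct': {
--         'Direct': ['Typed URL', 'Bookmark', 'App'],
--         'Internal': ['Cross-sell', 'Upsell', 'Navigation'],
--     },
--     'Email': {
--         'Email': ['Newsletter', 'Promotional', 'Transactional', 'Triggered'],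
--     },
--     'Other': {
--         'SMS': ['Marketing SMS', 'Transactional SMS'],
--         'Push': ['App Push', 'Web Push'],
--         'Offline': ['Store', 'Call Center', 'Event'],
--         'Unknown': ['Unknown'],
--     }
-- }
--
-- def get_hierarchy(channel: str) -> Tuple[str, str, str]:
--     """
--     Get full hierarchy for a channel.
--
--     Returns
--     -------
--     tuple
--         (Level1, Level2, Level3) or ('Unknown', 'Unknown', 'Unknown')
--     """
--     for level1, level2_dict in CHANNEL_TAXONOMY.items():
--         for level2, level3_list in level2_dict.items():
--             if channel == level2:
--                 return (level1, level2, level3_list[0] if level3_list else level2)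
--             if channel in level3_list:
--                 return (level1, level2, channel)
--
--     return ('Unknown', 'Unknown', channel)
-- ===== SOURCE B (Python) =====
-- CHANNEL_TAXONOMY = {
--     'Paid': {
--         'Paid Search': ['Brand Search', 'Non-Brand Search', 'Shopping'],
--         'Paid Social': ['Facebook Ads', 'Instagram Ads', 'LinkedIn Ads', 'Twitter Ads', 'TikTok Ads'],
--         'Display': ['Programmatic', 'Direct Buy', 'Retargeting'],
--         'Video': ['YouTube Ads', 'OTT/CTV', 'Pre-roll'],
--         'Affiliate': ['Partner', 'Influencer', 'Cashback'],
--     },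
--     'Organic': {
--         'Organic Search': ['Google', 'Bing', 'DuckDuckGo', 'Other Search'],
--         'Organic Social': ['Facebook', 'Instagram', 'LinkedIn', 'Twitter', 'TikTok', 'Reddit'],
--         'Content': ['Blog', 'News', 'Press'],
--         'Referral': ['Partner Sites', 'Review Sites', 'Forums'],
--     },
--     'Direct': {
--         'Direct': ['Typed URL', 'Bookmark', 'App'],
--         'Internal': ['Cross-sell', 'Upsell', 'Navigation'],
--     },
--     'Email': {
--         'Email': ['Newsletter', 'Promotional', 'Transactional', 'Triggered'],
--     },
--     'Other': {
--         'SMS': ['Marketing SMS', 'Transactional SMS'],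
--         'Push': ['App Push', 'Web Push'],
--         'Offline': ['Store', 'Call Center', 'Event'],
--         'Unknown': ['Unknown'],
--     }
-- }
--
-- # Flat lookup table built once; setdefault (level2 key first, then level3 keys,
-- # in the taxonomy's nested order) preserves the scan's first-match precedence.
-- LOOKUP = {}
-- for level1, level2_dict in CHANNEL_TAXONOMY.items():
--     for level2, level3_list in level2_dict.items():
--         LOOKUP.setdefault(level2, (level1, level2, level3_list[0] if level3_list else level2))
--         for c in level3_list:
--             LOOKUP.setdefault(c, (level1, level2, c))
--
--
-- def get_hierarchy(channel: str):
--     return LOOKUP.get(channel, ('Unknown', 'Unknown', channel))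
-- ===== Notes on version B (the rewrite author's own statement) =====
-- stated objective: idiomatic
-- what changed: B flattens the nested taxonomy once at module load into a single dict (setdefault in nested order preserves first-match precedence) so each call is one dict lookup instead of a nested scan.
import Mathlib
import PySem

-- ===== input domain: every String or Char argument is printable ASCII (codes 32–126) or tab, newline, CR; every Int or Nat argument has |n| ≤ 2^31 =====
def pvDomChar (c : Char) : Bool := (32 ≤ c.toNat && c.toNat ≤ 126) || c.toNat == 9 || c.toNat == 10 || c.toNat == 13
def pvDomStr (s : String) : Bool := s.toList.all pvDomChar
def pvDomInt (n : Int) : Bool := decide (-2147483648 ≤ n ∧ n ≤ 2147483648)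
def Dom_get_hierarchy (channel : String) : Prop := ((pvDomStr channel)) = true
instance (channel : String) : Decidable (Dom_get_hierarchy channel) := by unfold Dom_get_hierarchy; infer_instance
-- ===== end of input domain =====

-- B replaces A's per-call nested scan by a flat lookup table built once with setdefault
-- in the same nested order, so each call is a single dict lookup (objective: idiomatic).

-- The shared taxonomy literal (pure data used by both ports).
def CHANNEL_TAXONOMY : List (String × List (String × List String)) :=
  [ ("Paid",
      [ ("Paid Search", ["Brand Search", "Non-Brand Search", "Shopping"]),
        ("Paid Social", ["Facebook Ads", "Instagram Ads", "LinkedIn Ads", "Twitter Ads", "TikTok Ads"]),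
        ("Display", ["Programmatic", "Direct Buy", "Retargeting"]),
        ("Video", ["YouTube Ads", "OTT/CTV", "Pre-roll"]),
        ("Affiliate", ["Partner", "Influencer", "Cashback"]) ]),
    ("Organic",
      [ ("Organic Search", ["Google", "Bing", "DuckDuckGo", "Other Search"]),
        ("Organic Social", ["Facebook", "Instagram", "LinkedIn", "Twitter", "TikTok", "Reddit"]),
        ("Content", ["Blog", "News", "Press"]),
        ("Referral", ["Partner Sites", "Review Sites", "Forums"]) ]),
    ("Direct",
      [ ("Direct", ["Typed URL", "Bookmark", "App"]),
        ("Internal", ["Cross-sell", "Upsell", "Navigation"]) ]),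
    ("Email",
      [ ("Email", ["Newsletter", "Promotional", "Transactional", "Triggered"]) ]),
    ("Other",
      [ ("SMS", ["Marketing SMS", "Transactional SMS"]),
        ("Push", ["App Push", "Web Push"]),
        ("Offline", ["Store", "Call Center", "Event"]),
        ("Unknown", ["Unknown"]) ]) ]

-- ===== PORT A =====
-- A's inner loop: for level2, level3_list in level2_dict.items(): two early returns.
def ghScanL2 (channel level1 : String) :
    List (String × List String) → Option (String × String × String)
  | [] => none
  | (level2, level3_list) :: rest =>
    if channel = level2 then
      some (level1, level2, match level3_list with | [] => level2 | h :: _ => h)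
    else if channel ∈ level3_list then
      some (level1, level2, channel)
    else ghScanL2 channel level1 rest

-- A's outer loop: for level1, level2_dict in CHANNEL_TAXONOMY.items().
def ghScanL1 (channel : String) :
    List (String × List (String × List String)) → Option (String × String × String)
  | [] => none
  | (level1, level2_dict) :: rest =>
    match ghScanL2 channel level1 level2_dict with
    | some r => some r
    | none => ghScanL1 channel rest

def get_hierarchy (channel : String) : String × String × String :=
  (ghScanL1 channel CHANNEL_TAXONOMY).getD ("Unknown", "Unknown", channel)

-- ===== PORT B =====
-- B's build loops: LOOKUP.setdefault for the level2 key, then each level3 key.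
def ghBuildL3 (level1 level2 : String) (d : PySem.Dict String (String × String × String))
    (level3_list : List String) : PySem.Dict String (String × String × String) :=
  level3_list.foldl (fun d c => d.setdefault c (level1, level2, c)) d

def ghBuildL2 (level1 : String) (d : PySem.Dict String (String × String × String))
    (level2_dict : List (String × List String)) : PySem.Dict String (String × String × String) :=
  level2_dict.foldl
    (fun d p =>
      ghBuildL3 level1 p.1
        (d.setdefault p.1 (level1, p.1, match p.2 with | [] => p.1 | h :: _ => h)) p.2)
    d

def ghLOOKUP : PySem.Dict String (String × String × String) :=
  CHANNEL_TAXONOMY.foldl (fun d p => ghBuildL2 p.1 d p.2) PySem.Dict.empty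

def get_hierarchy_alt (channel : String) : String × String × String :=
  (ghLOOKUP.get? channel).getD ("Unknown", "Unknown", channel)

-- ===== PRECONDITION & SPEC =====
def Spec_get_hierarchy (channel : String) (out : String × String × String) : Prop := out = get_hierarchy_alt channel
instance (channel : String) (out : String × String × String) : Decidable (Spec_get_hierarchy channel out) := by unfold Spec_get_hierarchy; infer_instance

-- ===== CLAIM (what is proved, stated in full; the proofs are below) =====
def Claim_equal_get_hierarchy : Prop := ∀ (channel : String), Dom_get_hierarchy channel → Spec_get_hierarchy channel (get_hierarchy channel)

-- ===== LEMMAS AND PROOFS =====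

-- Early-return combinator used only in the proofs to relate scans and lookups.
def ghOr {α : Type} : Option α → Option α → Option α
  | some v, _ => some v
  | none, o => o

theorem ghOr_none {α : Type} (o : Option α) : ghOr none o = o := rfl

theorem ghOr_none_right {α : Type} (o : Option α) : ghOr o none = o := by cases o <;> rfl

theorem lookup_buildL3 (level1 level2 ch : String)
    (d : PySem.Dict String (String × String × String)) (l3 : List String) :
    (ghBuildL3 level1 level2 d l3).get? ch =
      ghOr (d.get? ch) (if ch ∈ l3 then some (level1, level2, ch) else none) := by
  induction l3 generalizing d with
  | nil => simp [ghBuildL3, ghOr_none_right]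
  | cons c rest ih =>
    show (ghBuildL3 level1 level2 (d.setdefault c (level1, level2, c)) rest).get? ch = _
    rw [ih]
    by_cases hc : ch = c
    · subst hc
      rw [PySem.Dict.get?_setdefault_self]
      simp only [List.mem_cons, true_or, if_pos]
      by_cases hr : ch ∈ rest <;>
        cases h : d.get? ch <;>
          simp [ghOr, Option.getD]
    · rw [PySem.Dict.get?_setdefault_of_ne _ _ hc]
      simp [List.mem_cons, hc]

theorem lookup_buildL2 (level1 ch : String)
    (d : PySem.Dict String (String × String × String)) (grps : List (String × List String)) :
    (ghBuildL2 level1 d grps).get? ch = ghOr (d.get? ch) (ghScanL2 ch level1 grps) := by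
  induction grps generalizing d with
  | nil => simp [ghBuildL2, ghScanL2, ghOr_none_right]
  | cons p rest ih =>
    obtain ⟨level2, l3⟩ := p
    show (ghBuildL2 level1 _ rest).get? ch = _
    rw [ih, lookup_buildL3]
    by_cases h2 : ch = level2
    · subst h2
      rw [PySem.Dict.get?_setdefault_self]
      simp only [ghScanL2, if_true]
      by_cases h3 : ch ∈ l3 <;>
        cases h : d.get? ch <;>
          simp [ghOr, Option.getD]
    · rw [PySem.Dict.get?_setdefault_of_ne _ _ h2]
      by_cases h3 : ch ∈ l3
      · cases h : d.get? ch <;> simp [ghScanL2, h2, h3, ghOr]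
      · cases h : d.get? ch <;> simp [ghScanL2, h2, h3, ghOr]

theorem lookup_buildL1 (ch : String)
    (d : PySem.Dict String (String × String × String))
    (tax : List (String × List (String × List String))) :
    (tax.foldl (fun d p => ghBuildL2 p.1 d p.2) d).get? ch =
      ghOr (d.get? ch) (ghScanL1 ch tax) := by
  induction tax generalizing d with
  | nil => simp [ghScanL1, ghOr_none_right]
  | cons p rest ih =>
    obtain ⟨level1, grp⟩ := p
    show (rest.foldl _ (ghBuildL2 level1 d grp)).get? ch = _
    rw [ih, lookup_buildL2]
    cases h : d.get? ch
    · simp only [ghOr_none, ghScanL1]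
      cases ghScanL2 ch level1 grp <;> simp [ghOr]
    · simp [ghOr]

-- ===== VERDICT (by name: the statement is the Claim_ definition above) =====
theorem get_hierarchy_spec : Claim_equal_get_hierarchy := by
  intro channel _
  show get_hierarchy channel = get_hierarchy_alt channel
  unfold get_hierarchy get_hierarchy_alt ghLOOKUP
  rw [lookup_buildL1, PySem.Dict.get?_empty, ghOr_none]
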